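-- pv_equiv track=rewrite | github.com/vlad-marlo/algorithms | contests/ya-training-3.0-a/1.py | solution
-- ===== SOURCE A (Python) =====
-- def transpond(data: list[list[str]]) -> list[list[str]]:
--     result = [["" for _ in range(len(data))] for _ in range(len(data[0]))]
--     for i in range(len(data)):
--         for j in range(len(data[0])):
--             result[j][i] = data[i][j]
--     return result
--
-- def solution(string: str) -> list[list[str]]:
--     string = string.replace(' ', '').replace('\n', '').replace('\r', '')
--     chars = sorted(set(string))
--     max_count = max(string.count(c) for c in chars)
--     result = [[" " for _ in range(max_count+1)] for _ in range(len(chars))]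
--     for i, char in enumerate(chars):
--         result[i][0] = char
--         for char_i in range(string.count(char)):
--             result[i][char_i+1] = "#"
--     return transpond(result)[::-1]
-- ===== SOURCE B (Python) =====
-- def solution(string: str) -> list[list[str]]:
--     cleaned = string.replace(' ', '').replace('\n', '').replace('\r', '')
--     chars = sorted(set(cleaned))
--     counts = [cleaned.count(c) for c in chars]
--     max_count = max(counts)
--     grid = []
--     for h in range(max_count, 0, -1):
--         grid.append(["#" if counts[i] >= h else " " for i in range(len(chars))])
--     grid.append(list(chars))
--     return grid
-- ===== Notes on version B (the rewrite author's own statement) =====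
-- stated objective: simpler
-- what changed: Builds the output grid directly row-by-row over height levels max_count..1 (cell = '#' iff count >= level) and appends the character row, instead of filling a chars-by-height matrix cell-wise and then transposing it with a helper and reversing it.
import Mathlib
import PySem

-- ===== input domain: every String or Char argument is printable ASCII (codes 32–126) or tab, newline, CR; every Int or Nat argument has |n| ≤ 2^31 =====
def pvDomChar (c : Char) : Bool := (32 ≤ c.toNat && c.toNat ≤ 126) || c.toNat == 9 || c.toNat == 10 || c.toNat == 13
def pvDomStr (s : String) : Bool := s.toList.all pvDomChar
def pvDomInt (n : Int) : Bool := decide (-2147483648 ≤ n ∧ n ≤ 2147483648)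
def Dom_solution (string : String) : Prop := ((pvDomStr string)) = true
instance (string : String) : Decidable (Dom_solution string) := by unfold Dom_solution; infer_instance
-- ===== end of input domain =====

-- B builds the histogram grid directly over height levels (cell = "#" iff count ≥ level) instead of
-- filling a chars×height matrix cell-wise and then transposing and reversing it (objective: simpler).

-- ===== PORT A =====
-- helper of A: transpond(data); data[0] on empty data raises in Python (outside Pre_), pyGetD data 0 [] is its total form
def transpond (data : List (List String)) : List (List String) :=
  let result := (PySem.List.pyRange 0 ((PySem.List.pyGetD data 0 []).length : Int) 1).map
      (fun _ => (PySem.List.pyRange 0 (data.length : Int) 1).map (fun _ => ""))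
  (PySem.List.pyRange 0 (data.length : Int) 1).foldl (fun result i =>
    (PySem.List.pyRange 0 ((PySem.List.pyGetD data 0 []).length : Int) 1).foldl (fun result j =>
      PySem.List.pySetD result j
        (PySem.List.pySetD (PySem.List.pyGetD result j []) i
          (PySem.List.pyGetD (PySem.List.pyGetD data i []) j ""))) result) result

def solution (string : String) : List (List String) :=
  let s := PySem.Str.replace (PySem.Str.replace (PySem.Str.replace string " " "") "\n" "") "\r" ""
  let chars := PySem.List.sorted (PySem.Set.ofList s.toList) (fun c => c)
  -- string.count(c) for a single-character c is exactly the element count of the char list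
  -- max(...) raises ValueError on an empty generator (excluded by Pre_); .getD 0 is its total form
  let max_count := (PySem.List.max? (chars.map (fun c => (PySem.List.count s.toList c : Int))) (fun x => x)).getD 0
  let result := (PySem.List.pyRange 0 (chars.length : Int) 1).map
      (fun _ => (PySem.List.pyRange 0 (max_count + 1) 1).map (fun _ => " "))
  let result := (PySem.List.enumerate chars).foldl (fun result ic =>
    let result := PySem.List.pySetD result ic.1
        (PySem.List.pySetD (PySem.List.pyGetD result ic.1 []) 0 (String.ofList [ic.2]))
    (PySem.List.pyRange 0 (PySem.List.count s.toList ic.2 : Int) 1).foldl (fun result ci =>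
      PySem.List.pySetD result ic.1
        (PySem.List.pySetD (PySem.List.pyGetD result ic.1 []) (ci + 1) "#")) result) result
  (PySem.List.slice? (transpond result) none none (-1)).getD []

-- ===== PORT B =====
def solution_alt (string : String) : List (List String) :=
  let cleaned := PySem.Str.replace (PySem.Str.replace (PySem.Str.replace string " " "") "\n" "") "\r" ""
  let chars := PySem.List.sorted (PySem.Set.ofList cleaned.toList) (fun c => c)
  let counts := chars.map (fun c => (PySem.List.count cleaned.toList c : Int))
  -- max(counts) raises ValueError on an empty list (excluded by Pre_); .getD 0 is its total form
  let max_count := (PySem.List.max? counts (fun x => x)).getD 0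
  let grid := (PySem.List.pyRange max_count 0 (-1)).map (fun h =>
      (PySem.List.pyRange 0 (chars.length : Int) 1).map (fun i =>
        if h ≤ PySem.List.pyGetD counts i 0 then "#" else " "))
  grid ++ [chars.map (fun c => String.ofList [c])]

-- ===== PRECONDITION & SPEC =====
-- Pre_ excludes exactly the strings that are empty after removing ' ', '\n', '\r':
-- there Python's max() over an empty sequence raises ValueError in both A and B.
-- a character that survives the cleaning (not ' ', '\n' or '\r')
def keepChar (c : Char) : Bool := !(c == ' ' || c == '\n' || c == '\r')
def Pre_solution (string : String) : Prop := (string.toList.any keepChar) = true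
instance (string : String) : Decidable (Pre_solution string) := by unfold Pre_solution; infer_instance
def pvWitness_solution : String := "ab a"

def Spec_solution (string : String) (out : List (List String)) : Prop := out = solution_alt string
instance (string : String) (out : List (List String)) : Decidable (Spec_solution string out) := by unfold Spec_solution; infer_instance

-- ===== CLAIM (what is proved, stated in full; the proofs are below) =====
def Claim_equal_solution : Prop := ∀ (string : String), Dom_solution string → Pre_solution string → Spec_solution string (solution string)

-- ===== LEMMAS AND PROOFS =====
-- string.replace(c, '') removes exactly the occurrences of the single character c
theorem go_single (c : Char) : ∀ (l : List Char) (fuel : Nat) (acc : List Char), l.length ≤ fuel →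
    PySem.Chars.replace.go [c] [] fuel l acc = acc.reverse ++ l.filter (fun x => !(x == c)) := by
  intro l
  induction l with
  | nil => intro fuel acc h; cases fuel <;> simp [PySem.Chars.replace.go]
  | cons x t ih =>
    intro fuel acc h
    cases fuel with
    | zero => simp at h
    | succ m =>
      rw [PySem.Chars.replace.go]
      by_cases hx : c = x
      · subst hx
        simp only [List.isPrefixOf, BEq.rfl, Bool.true_and, if_true,
          List.length_cons, List.length_nil, List.drop_succ_cons, List.drop_zero,
          List.reverse_nil, List.nil_append]
        rw [ih m acc (by simpa using Nat.le_of_succ_le_succ h)]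
        simp
      · have hp : ([c].isPrefixOf (x :: t)) = false := by
          simp [List.isPrefixOf, hx]
        rw [hp]
        simp only [Bool.false_eq_true, if_false]
        rw [ih m (x :: acc) (by simpa using Nat.le_of_succ_le_succ h)]
        simp [Ne.symm hx]

theorem replace_single (c : Char) (l : List Char) :
    PySem.Chars.replace l [c] [] = l.filter (fun x => !(x == c)) := by
  rw [PySem.Chars.replace]
  simp only [List.isEmpty_cons]
  exact go_single c l l.length [] le_rfl

-- the cleaned string of both ports, as a filter of the input's characters
theorem clean_eq (s : String) :
    (PySem.Str.replace (PySem.Str.replace (PySem.Str.replace s " " "") "\n" "") "\r" "").toList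
      = s.toList.filter (fun x => !(x == ' ') && !(x == '\n') && !(x == '\r')) := by
  simp only [PySem.Str.toList_replace]
  have h1 : (" " : String).toList = [' '] := rfl
  have h2 : ("\n" : String).toList = ['\n'] := rfl
  have h3 : ("\r" : String).toList = ['\r'] := rfl
  have h4 : ("" : String).toList = [] := rfl
  rw [h1, h2, h3, h4, replace_single, replace_single, replace_single]
  rw [List.filter_filter, List.filter_filter]
  apply List.filter_congr
  intro x _
  cases hx1 : x == ' ' <;> cases hx2 : x == '\n' <;> cases hx3 : x == '\r' <;> simp

theorem set_map_range {a : Type} (f : Nat → a) (N q : Nat) (_hq : q < N) (v : a) :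
    ((List.range N).map f).set q v = (List.range N).map fun k => if k = q then v else f k := by
  apply List.ext_getElem
  · simp
  · intro i h1 h2
    simp only [List.getElem_set, List.getElem_map, List.getElem_range]
    split_ifs with e1 e2 e3 <;> first | rfl | omega

theorem fold_sharp (Mn : Nat) (ch : String) : ∀ (m : Nat), m ≤ Mn →
    (List.range m).foldl (fun row k => row.set (k + 1) "#")
        (((List.range (Mn + 1)).map (fun _ => " ")).set 0 ch)
      = ch :: (List.range Mn).map (fun k => if k < m then "#" else " ") := by
  intro m
  induction m with
  | zero =>
    intro _
    apply List.ext_getElem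
    · simp
    · intro i h1 h2
      simp only [List.range_zero, List.foldl_nil, List.getElem_set]
      cases i with
      | zero => simp
      | succ j => simp
  | succ m ih =>
    intro hm
    rw [show List.range (m + 1) = List.range m ++ [m] from List.range_succ, List.foldl_append,
      ih (by omega), List.foldl_cons, List.foldl_nil, List.set_cons_succ,
      set_map_range _ _ _ (by omega)]
    congr 1
    apply List.map_congr_left
    intro k hk
    simp only [List.mem_range] at hk
    split_ifs <;> first | rfl | omega

theorem foldl_row_collapse {b : Type} (g : b → List String → List String) (a : Nat) :
    ∀ (l : List b) (res : List (List String)), a < res.length →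
    l.foldl (fun r x => PySem.List.pySetD r (a : Int) (g x (PySem.List.pyGetD r (a : Int) []))) res
      = PySem.List.pySetD res (a : Int)
          (l.foldl (fun row x => g x row) (PySem.List.pyGetD res (a : Int) [])) := by
  intro l
  induction l with
  | nil =>
    intro res ha
    simp only [List.foldl_nil, PySem.List.pySetD_natCast, PySem.List.pyGetD_natCast]
    rw [List.getD_eq_getElem _ _ ha, List.set_getElem_self]
  | cons x t ih =>
    intro res ha
    simp only [List.foldl_cons]
    rw [ih _ (by simpa [PySem.List.pySetD_natCast] using ha)]
    simp only [PySem.List.pySetD_natCast, PySem.List.pyGetD_natCast]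
    simp [List.getD_eq_getElem?_getD, ha, List.set_set]

def rowA (Mn : Nat) (cnt : Char → Nat) (c : Char) : List String :=
  String.ofList [c] :: (List.range Mn).map (fun k => if k < cnt c then "#" else " ")

theorem rowA_eq (Mn cnt : Nat) (ch : String) (hle : cnt ≤ Mn) :
    (PySem.List.pyRange 0 (cnt : Int) 1).foldl (fun row ci => PySem.List.pySetD row (ci + 1) "#")
      (PySem.List.pySetD ((List.range (Mn + 1)).map (fun _ => " ")) 0 ch)
    = ch :: (List.range Mn).map (fun k => if k < cnt then "#" else " ") := by
  rw [PySem.List.pyRange_zero_natCast, List.foldl_map]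
  have h2 : ∀ (row : List String) (k : Nat),
      PySem.List.pySetD row ((k : Int) + 1) "#" = row.set (k + 1) "#" := by
    intro row k
    rw [show ((k : Int) + 1) = (((k + 1 : Nat)) : Int) by push_cast; ring, PySem.List.pySetD_natCast]
  simp only [h2]
  rw [show (0 : Int) = ((0 : Nat) : Int) from rfl, PySem.List.pySetD_natCast]
  exact fold_sharp Mn ch cnt hle

theorem foldA (t : List Char) (Mn : Nat) :
    ∀ (cs : List Char) (a : Nat) (res : List (List String)),
    res.length = a + cs.length →
    (∀ j, a ≤ j → j < res.length → res.getD j [] = (List.range (Mn + 1)).map (fun _ => " ")) →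
    (∀ c ∈ cs, PySem.List.count t c ≤ Mn) →
    (PySem.List.enumerate cs (a : Int)).foldl
      (fun result ic =>
        (PySem.List.pyRange 0 ((PySem.List.count t ic.2 : Nat) : Int) 1).foldl
          (fun result ci => PySem.List.pySetD result ic.1
             (PySem.List.pySetD (PySem.List.pyGetD result ic.1 []) (ci + 1) "#"))
          (PySem.List.pySetD result ic.1
             (PySem.List.pySetD (PySem.List.pyGetD result ic.1 []) 0 (String.ofList [ic.2]))))
      res
    = res.take a ++ cs.map (rowA Mn (fun c => PySem.List.count t c)) := by
  intro cs
  induction cs with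
  | nil =>
    intro a res hlen _ _
    simp only [PySem.List.enumerate_nil, List.foldl_nil, List.map_nil, List.append_nil]
    rw [List.take_of_length_le (by simp at hlen; omega)]
  | cons c cs ih =>
    intro a res hlen hinit hcnt
    have ha : a < res.length := by simp at hlen; omega
    rw [PySem.List.enumerate_cons, List.foldl_cons]
    dsimp only
    -- the first write of row a
    have e1 : PySem.List.pySetD res (a : Int)
        (PySem.List.pySetD (PySem.List.pyGetD res (a : Int) []) 0 (String.ofList [c]))
        = res.set a (PySem.List.pySetD ((List.range (Mn + 1)).map (fun _ => " ")) 0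
            (String.ofList [c])) := by
      rw [PySem.List.pySetD_natCast, PySem.List.pyGetD_natCast, hinit a le_rfl ha]
    rw [e1]
    -- the '#'-writing loop collapses to a single rewrite of row a
    rw [foldl_row_collapse (fun ci row => PySem.List.pySetD row (ci + 1) "#") a _ _
      (by simpa using ha)]
    rw [PySem.List.pySetD_natCast, PySem.List.pyGetD_natCast]
    rw [List.getD_eq_getElem _ _ (by simpa using ha), List.getElem_set_self (by simpa using ha)]
    rw [rowA_eq Mn _ _ (hcnt c (by simp)), List.set_set]
    have e2 : ((a : Int) + 1) = (((a + 1 : Nat)) : Int) := by push_cast; ring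
    rw [e2, ih (a + 1) _ (by simp at hlen ⊢; omega)
      (by
        intro j hj hjl
        rw [List.getD_eq_getElem _ _ (by simpa using hjl),
          List.getElem_set_ne (by omega) (by simpa using hjl),
          ← List.getD_eq_getElem _ [] (by simpa using hjl)]
        exact hinit j (by omega) (by simpa using hjl))
      (fun d hd => hcnt d (by simp [hd]))]
    rw [show (String.ofList [c] :: List.map (fun k => if k < PySem.List.count t c then "#" else " ")
        (List.range Mn)) = rowA Mn (fun c => PySem.List.count t c) c from rfl]
    -- take (a+1) of the updated grid is take a ++ the new row
    have e3 : (res.set a (rowA Mn (fun c => PySem.List.count t c) c)).take (a + 1)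
        = res.take a ++ [rowA Mn (fun c => PySem.List.count t c) c] := by
      rw [List.take_set, List.take_add_one, List.getElem?_eq_getElem ha]
      simp only [Option.toList_some]
      rw [List.set_append]
      simp [List.length_take, Nat.min_eq_left (le_of_lt ha)]
    rw [e3, List.map_cons, List.append_assoc, List.singleton_append]

-- one pass of A's transpose writes position i of every row
theorem foldl_set_all (v : Nat → List String → List String) :
    ∀ (q m : Nat) (R : Nat → List String), q ≤ m →
    (List.range q).foldl (fun res j => res.set j (v j (res.getD j []))) ((List.range m).map R)
      = (List.range m).map (fun j => if j < q then v j (R j) else R j) := by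
  intro q
  induction q with
  | zero =>
    intro m R _
    simp only [List.range_zero, List.foldl_nil]
    apply List.map_congr_left
    intro k _
    simp
  | succ q ih =>
    intro m R hq
    rw [show List.range (q + 1) = List.range q ++ [q] from List.range_succ, List.foldl_append,
      ih m R (by omega), List.foldl_cons, List.foldl_nil]
    rw [List.getD_eq_getElem _ _ (by simpa using (by omega : q < m)), List.getElem_map,
      List.getElem_range, if_neg (by omega)]
    rw [set_map_range _ _ _ (by omega)]
    apply List.map_congr_left
    intro k hk
    simp only [List.mem_range] at hk
    by_cases hkq : k = q
    · subst hkq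
      rw [if_pos rfl, if_pos (by omega)]
    · rw [if_neg hkq]
      split_ifs <;> first | rfl | omega

theorem transpond_eq (data : List (List String)) (m : Nat)
    (h0 : (PySem.List.pyGetD data 0 []).length = m) :
    transpond data = (List.range m).map (fun j =>
      (List.range data.length).map (fun i => (data.getD i []).getD j "")) := by
  unfold transpond
  rw [h0]
  rw [show ((data.length : Nat) : Int) = ((data.length : Nat) : Int) from rfl]
  rw [PySem.List.pyRange_zero_natCast, PySem.List.pyRange_zero_natCast, List.foldl_map,
    List.map_map]
  have inner_eq : ∀ (i : Nat) (res : List (List String)),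
      (List.map (fun k : Nat => (k : Int)) (List.range m)).foldl (fun result j =>
        PySem.List.pySetD result j
          (PySem.List.pySetD (PySem.List.pyGetD result j []) ((i : Nat) : Int)
            (PySem.List.pyGetD (PySem.List.pyGetD data ((i : Nat) : Int) []) j ""))) res
      = (List.range m).foldl (fun res j =>
          res.set j ((res.getD j []).set i ((data.getD i []).getD j ""))) res := by
    intro i res
    rw [List.foldl_map]
    simp only [PySem.List.pySetD_natCast, PySem.List.pyGetD_natCast]
  have main : ∀ (k : Nat), k ≤ data.length →
      (List.range k).foldl (fun result i =>
        (List.range m).foldl (fun res j =>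
          res.set j ((res.getD j []).set i ((data.getD i []).getD j ""))) result)
        ((List.range m).map (fun _ => (List.range data.length).map (fun _ => "")))
      = (List.range m).map (fun j => (List.range data.length).map
          (fun i => if i < k then (data.getD i []).getD j "" else "")) := by
    intro k
    induction k with
    | zero =>
      intro _
      simp only [List.range_zero, List.foldl_nil]
      apply List.map_congr_left
      intro j _
      apply List.map_congr_left
      intro i _
      simp
    | succ k ihk =>
      intro hk
      rw [show List.range (k + 1) = List.range k ++ [k] from List.range_succ, List.foldl_append,
        ihk (by omega), List.foldl_cons, List.foldl_nil]
      rw [foldl_set_all (fun j row => row.set k ((data.getD k []).getD j "")) m m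
        (fun j => (List.range data.length).map
          (fun i => if i < k then (data.getD i []).getD j "" else "")) le_rfl]
      apply List.map_congr_left
      intro j hj
      simp only [List.mem_range] at hj
      rw [if_pos hj]
      rw [set_map_range _ _ _ (by omega)]
      apply List.map_congr_left
      intro i hi
      simp only [List.mem_range] at hi
      by_cases hik : i = k
      · subst hik
        rw [if_pos rfl, if_pos (by omega)]
      · rw [if_neg hik]
        split_ifs <;> first | rfl | omega
  simp only [List.map_map, Function.comp_def]
  have hfun : (fun (result : List (List String)) (k : Nat) =>
      (List.map (fun k : Nat => (k : Int)) (List.range m)).foldl (fun result j =>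
        PySem.List.pySetD result j
          (PySem.List.pySetD (PySem.List.pyGetD result j []) ((k : Nat) : Int)
            (PySem.List.pyGetD (PySem.List.pyGetD data ((k : Nat) : Int) []) j ""))) result)
      = (fun (result : List (List String)) (i : Nat) =>
        (List.range m).foldl (fun res j =>
          res.set j ((res.getD j []).set i ((data.getD i []).getD j ""))) result) := by
    funext res i
    exact inner_eq i res
  rw [hfun, main data.length le_rfl]
  apply List.map_congr_left
  intro j _
  apply List.map_congr_left
  intro i hi
  simp only [List.mem_range] at hi
  rw [if_pos hi]

-- ===== VERDICT (by name: the statement is the Claim_ definition above) =====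
theorem solution_spec : Claim_equal_solution := by
  intro string _ hpre
  unfold Spec_solution solution solution_alt
  dsimp only
  generalize hT : (PySem.Str.replace (PySem.Str.replace (PySem.Str.replace string " " "")
      "\n" "") "\r" "").toList = t
  -- the cleaned text is nonempty
  have hclean := clean_eq string
  rw [hT] at hclean
  have htne : t ≠ [] := by
    obtain ⟨c, hc, hkc⟩ := List.any_eq_true.1 hpre
    simp only [keepChar, Bool.not_eq_eq_eq_not, Bool.not_true, Bool.or_eq_false_iff,
      beq_eq_false_iff_ne] at hkc
    refine List.ne_nil_of_mem (a := c) ?_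
    rw [hclean]
    exact List.mem_filter.2 ⟨hc, by simp_all⟩
  set chars := PySem.List.sorted (PySem.Set.ofList t) (fun c => c) with hchars
  have hchne : chars ≠ [] := by
    rw [hchars, Ne, PySem.List.sorted_eq_nil_iff]
    intro h
    obtain ⟨c, hct⟩ := List.exists_mem_of_ne_nil t htne
    exact absurd (h ▸ ((PySem.Set.mem_ofList t c).2 hct)) (List.not_mem_nil)
  obtain ⟨c0, chars0, hc0⟩ : ∃ c0 rest, chars = c0 :: rest := by
    cases h : chars with
    | nil => exact absurd h hchne
    | cons a l => exact ⟨a, l, rfl⟩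
  -- the maximum count
  obtain ⟨m, hm⟩ : ∃ m, PySem.List.max?
      (chars.map fun c => ((PySem.List.count t c : Nat) : Int)) (fun x => x) = some m := by
    cases h : PySem.List.max? (chars.map fun c => ((PySem.List.count t c : Nat) : Int))
        (fun x => x) with
    | none =>
      rw [PySem.List.max?_eq_none_iff] at h
      simp [hc0] at h
    | some m => exact ⟨m, rfl⟩
  obtain ⟨cM, hcM, hMeq⟩ := List.mem_map.1 (PySem.List.max?_mem hm)
  obtain ⟨M, hmM⟩ : ∃ M : Nat, m = ((M : Nat) : Int) := ⟨PySem.List.count t cM, hMeq.symm⟩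
  have hle : ∀ c ∈ chars, PySem.List.count t c ≤ M := by
    intro c hc
    have h1 := PySem.List.max?_isMax hm _ (List.mem_map_of_mem (f := fun c =>
      ((PySem.List.count t c : Nat) : Int)) hc)
    rw [hmM] at h1
    have h2 : ((PySem.List.count t c : Nat) : Int) ≤ ((M : Nat) : Int) := h1
    exact_mod_cast h2
  rw [hm, hmM]
  simp only [Option.getD_some]
  -- A's init grid in Nat form
  rw [show ((M : Int) + 1) = (((M + 1 : Nat)) : Int) by push_cast; ring,
    PySem.List.pyRange_zero_natCast (M + 1), PySem.List.pyRange_zero_natCast chars.length]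
  simp only [List.map_map, Function.comp_def]
  -- A's filling loop
  rw [show PySem.List.enumerate chars 0 = PySem.List.enumerate chars ((0 : Nat) : Int) from rfl]
  rw [foldA t M chars 0 _ (by simp)
    (by
      intro j _ hj
      simp only [List.length_map, List.length_range] at hj
      rw [List.getD_eq_getElem _ _ (by simpa using hj), List.getElem_map])
    hle]
  simp only [List.take_zero, List.nil_append]
  -- A's transpose in closed form
  rw [transpond_eq (chars.map (rowA M (fun c => PySem.List.count t c))) (M + 1)
    (by
      rw [show (0 : Int) = ((0 : Nat) : Int) from rfl, PySem.List.pyGetD_natCast]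
      simp [hc0, rowA])]
  rw [PySem.List.slice?_none_none_neg_one, Option.getD_some]
  -- B's grid in Nat form
  rw [PySem.List.pyRange_neg_one]
  simp only [Int.sub_zero, Int.toNat_natCast, List.length_map, List.map_map, Function.comp_def]
  -- compare row by row
  apply List.ext_getElem
  · simp
  · intro r h1 h2
    simp only [List.getElem_reverse, List.length_map, List.length_range, List.getElem_map,
      List.getElem_range]
    have hr1 : M + 1 - 1 - r = M - r := by omega
    rw [hr1]
    simp only [List.length_append, List.length_map, List.length_range, List.length_cons,
      List.length_nil] at h2
    by_cases hr : r < M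
    · rw [List.getElem_append_left (by simpa using hr)]
      simp only [List.getElem_map, List.getElem_range]
      apply List.map_congr_left
      intro i hi
      simp only [List.mem_range] at hi
      have hrow : (List.map (rowA M fun c => PySem.List.count t c) chars).getD i []
          = rowA M (fun c => PySem.List.count t c) chars[i] := by
        rw [List.getD_eq_getElem _ _ (by simpa using hi), List.getElem_map]
      rw [hrow]
      have hcnts : PySem.List.pyGetD
            (List.map (fun c => ((PySem.List.count t c : Nat) : Int)) chars) ((i : Nat) : Int) 0
          = ((PySem.List.count t chars[i] : Nat) : Int) := by
        rw [PySem.List.pyGetD_natCast, List.getD_eq_getElem _ _ (by simpa using hi),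
          List.getElem_map]
      rw [hcnts]
      have hgetrow : (rowA M (fun c => PySem.List.count t c) chars[i]).getD (M - r) ""
          = if M - r - 1 < PySem.List.count t chars[i] then "#" else " " := by
        simp only [rowA]
        rw [show M - r = (M - r - 1) + 1 by omega, List.getD_cons_succ]
        rw [List.getD_eq_getElem _ _ (by simp; omega), List.getElem_map, List.getElem_range]
        simp only [show M - r - 1 + 1 - 1 = M - r - 1 from by omega]
      rw [hgetrow]
      have hiff : ((M : Int) - (r : Int) ≤ ((PySem.List.count t chars[i] : Nat) : Int))
          ↔ (M - r - 1 < PySem.List.count t chars[i]) := by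
        have hMr : r < M := hr
        omega
      simp only [hiff]
    · rw [show M - r = 0 from by omega]
      rw [List.getElem_append_right (by simp; omega)]
      simp only [List.getElem_singleton]
      apply List.ext_getElem
      · simp
      · intro i hi1 hi2
        simp only [List.length_map, List.length_range] at hi1
        simp only [List.getElem_map, List.getElem_range]
        have hrow : (List.map (rowA M fun c => PySem.List.count t c) chars).getD i []
            = rowA M (fun c => PySem.List.count t c) chars[i] := by
          rw [List.getD_eq_getElem _ _ (by simpa using hi1), List.getElem_map]
        rw [hrow]
        simp [rowA]
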